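-- pv_equiv track=rewrite | github.com/khuongnguyen-coder/boat-autopilot | views/map/map_layer/airare_layer.py | properties_str
-- ===== SOURCE A (Python) =====
-- def properties_str(props):
--     """
--     Return a formatted string of feature properties.
--
--     Important keys are shown first, followed by the rest.
--     """
--     important_keys = ["OBJNAM", "AIRACN", "AIRSTA", "CATARA", "FLTOPA", "FLBOT"]
--     lines = []
--
--     # First, show important keys
--     for key in important_keys:
--         if key in props:
--             value = props[key]
--             if isinstance(value, list):
--                 value = ", ".join(map(str, value))
--             lines.append(f"{key}: {value}")
--
--     # Then, show all other keys
--     for key, value in props.items():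
--         if key not in important_keys:
--             if isinstance(value, list):
--                 value = ", ".join(map(str, value))
--             lines.append(f"{key}: {value}")
--
--     return "\n".join(lines)
-- ===== SOURCE B (Python) =====
-- def properties_str(props):
--     """
--     Return a formatted string of feature properties.
--
--     Single pass: each item is dropped into a bucket chosen by the key's
--     rank (index among the important keys, or the last bucket), then the
--     buckets are flattened in order.
--     """
--     important_keys = ["OBJNAM", "AIRACN", "AIRSTA", "CATARA", "FLTOPA", "FLBOT"]
--     rank = {k: i for i, k in enumerate(important_keys)}
--     n = len(important_keys)
--     buckets = [[] for _ in range(n + 1)]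
--     for key, value in props.items():
--         if isinstance(value, list):
--             value = ", ".join(map(str, value))
--         buckets[rank.get(key, n)].append(f"{key}: {value}")
--     return "\n".join(line for bucket in buckets for line in bucket)
-- ===== Notes on version B (the rewrite author's own statement) =====
-- stated objective: alternative
-- what changed: A scans the important-key list with per-key dict lookups and then makes a second filtered pass over the items; B makes one pass over the items, dropping each formatted line into a bucket indexed by the key's rank (a precomputed index dict), and flattens the buckets.
import Mathlib
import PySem

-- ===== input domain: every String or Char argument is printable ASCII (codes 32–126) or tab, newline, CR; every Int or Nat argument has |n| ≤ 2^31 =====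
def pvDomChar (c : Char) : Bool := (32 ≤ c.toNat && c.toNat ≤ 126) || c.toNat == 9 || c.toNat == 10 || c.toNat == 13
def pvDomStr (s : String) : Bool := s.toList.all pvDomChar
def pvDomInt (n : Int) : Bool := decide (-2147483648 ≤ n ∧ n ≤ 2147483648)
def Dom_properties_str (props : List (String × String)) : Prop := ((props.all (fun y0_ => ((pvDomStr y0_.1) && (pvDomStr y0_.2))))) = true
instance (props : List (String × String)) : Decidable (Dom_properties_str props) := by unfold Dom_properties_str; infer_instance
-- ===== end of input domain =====

-- B replaces A's important-key scan plus second filtered pass over the items by ONE bucket-distributing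
-- pass over the items (rank-index dict, buckets flattened in order); same cost, different shape.
-- Values here are strings (dict[str, str]), so the Python's isinstance-list branch is dead code and not ported.

-- shared literal constant and the f-string "key: value"
def pvIK : List String := ["OBJNAM", "AIRACN", "AIRSTA", "CATARA", "FLTOPA", "FLBOT"]
def pvFmt (k v : String) : String := k ++ ": " ++ v

-- ===== PORT A =====
def properties_str (props : List (String × String)) : String :=
  let d := PySem.Dict.ofList props
  -- First, show important keys.  props[key] is guarded by `key in props`, so getD is exact here.
  let lines := pvIK.foldl (fun lines key =>
      if d.contains key then lines ++ [pvFmt key (d.getD key "")] else lines) []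
  -- Then, show all other keys.
  let lines := d.items.foldl (fun lines kv =>
      if !(pvIK.contains kv.1) then lines ++ [pvFmt kv.1 kv.2] else lines) lines
  PySem.Str.join "\n" lines

-- ===== PORT B =====
def properties_str_alt (props : List (String × String)) : String :=
  let d := PySem.Dict.ofList props
  let rank : PySem.Dict String Int :=
    PySem.Dict.ofList (pvIK.zipIdx.map (fun p => (p.1, (p.2 : Int))))
  let n := pvIK.length
  let buckets : List (List String) := List.replicate (n + 1) []
  -- rank.get(key, n) lies in [0, n], so getD/set index exactly as Python's buckets[r].append
  let buckets := d.items.foldl (fun bs kv =>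
      let r := (rank.getD kv.1 ((n : Int))).toNat
      bs.set r (bs.getD r [] ++ [pvFmt kv.1 kv.2])) buckets
  PySem.Str.join "\n" buckets.flatten

-- ===== PRECONDITION & SPEC =====
def Spec_properties_str (props : List (String × String)) (out : String) : Prop := out = properties_str_alt props
instance (props : List (String × String)) (out : String) : Decidable (Spec_properties_str props out) := by unfold Spec_properties_str; infer_instance

-- ===== CLAIM (what is proved, stated in full; the proofs are below) =====
def Claim_equal_properties_str : Prop := ∀ (props : List (String × String)), Dom_properties_str props → Spec_properties_str props (properties_str props)

-- ===== LEMMAS AND PROOFS =====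

-- proof-side names for B's rank dict, rank function, fold step, and the bucket contents
def pvRank : PySem.Dict String Int := PySem.Dict.ofList (pvIK.zipIdx.map (fun p => (p.1, (p.2 : Int))))

def pvRk (k : String) : Nat := (pvRank.getD k ((pvIK.length : Int))).toNat

def pvStep (bs : List (List String)) (kv : String × String) : List (List String) :=
  let r := pvRk kv.1
  bs.set r (bs.getD r [] ++ [pvFmt kv.1 kv.2])

def pvF (i : Nat) (ps : List (String × String)) : List String :=
  (ps.filter (fun kv => pvRk kv.1 == i)).map (fun kv => pvFmt kv.1 kv.2)

lemma pvStep_eq (bs : List (List String)) (kv : String × String) :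
    pvStep bs kv = bs.set (pvRk kv.1) (bs.getD (pvRk kv.1) [] ++ [pvFmt kv.1 kv.2]) := rfl

lemma pvAltEq (props : List (String × String)) :
    properties_str_alt props =
      PySem.Str.join "\n"
        ((List.foldl pvStep [[], [], [], [], [], [], []] (PySem.Dict.ofList props).items).flatten) := rfl

lemma pvAEq (props : List (String × String)) :
    properties_str props =
      PySem.Str.join "\n"
        (List.foldl (fun lines kv => if !(pvIK.contains kv.1) then lines ++ [pvFmt kv.1 kv.2] else lines)
          (List.foldl (fun lines key =>
              if (PySem.Dict.ofList props).contains key then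
                lines ++ [pvFmt key ((PySem.Dict.ofList props).getD key "")]
              else lines) [] pvIK)
          (PySem.Dict.ofList props).items) := rfl

lemma pvRk_chain (k : String) :
    pvRk k = if "OBJNAM" == k then 0 else if "AIRACN" == k then 1 else if "AIRSTA" == k then 2
      else if "CATARA" == k then 3 else if "FLTOPA" == k then 4 else if "FLBOT" == k then 5 else 6 := by
  have h : pvRank = PySem.Dict.mk [("OBJNAM", (0 : Int)), ("AIRACN", 1), ("AIRSTA", 2),
      ("CATARA", 3), ("FLTOPA", 4), ("FLBOT", 5)] := rfl
  rw [pvRk, h]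
  by_cases e0 : "OBJNAM" = k
  · subst e0; decide
  · by_cases e1 : "AIRACN" = k
    · subst e1; decide
    · by_cases e2 : "AIRSTA" = k
      · subst e2; decide
      · by_cases e3 : "CATARA" = k
        · subst e3; decide
        · by_cases e4 : "FLTOPA" = k
          · subst e4; decide
          · by_cases e5 : "FLBOT" = k
            · subst e5; decide
            · have f0 : (("OBJNAM" : String) == k) = false := beq_eq_false_iff_ne.mpr e0
              have f1 : (("AIRACN" : String) == k) = false := beq_eq_false_iff_ne.mpr e1
              have f2 : (("AIRSTA" : String) == k) = false := beq_eq_false_iff_ne.mpr e2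
              have f3 : (("CATARA" : String) == k) = false := beq_eq_false_iff_ne.mpr e3
              have f4 : (("FLTOPA" : String) == k) = false := beq_eq_false_iff_ne.mpr e4
              have f5 : (("FLBOT" : String) == k) = false := beq_eq_false_iff_ne.mpr e5
              simp [PySem.Dict.getD, PySem.Dict.get?, List.find?, f0, f1, f2, f3, f4, f5, pvIK]

-- the bucket fold distributes each item into the bucket named by its rank
lemma pvBuckets (ps : List (String × String)) :
    ∀ b0 b1 b2 b3 b4 b5 b6 : List String,
      List.foldl pvStep [b0, b1, b2, b3, b4, b5, b6] ps
        = [b0 ++ pvF 0 ps, b1 ++ pvF 1 ps, b2 ++ pvF 2 ps, b3 ++ pvF 3 ps,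
           b4 ++ pvF 4 ps, b5 ++ pvF 5 ps, b6 ++ pvF 6 ps] := by
  induction ps with
  | nil => intro b0 b1 b2 b3 b4 b5 b6; simp [pvF]
  | cons kv t ih =>
    intro b0 b1 b2 b3 b4 b5 b6
    have hch := pvRk_chain kv.1
    cases h0 : (("OBJNAM" : String) == kv.1) with
    | true =>
      have hk : pvRk kv.1 = 0 := by rw [hch]; simp [h0]
      simp [List.foldl_cons, pvStep_eq, hk, ih, pvF, List.filter_cons]
    | false =>
      cases h1 : (("AIRACN" : String) == kv.1) with
      | true =>
        have hk : pvRk kv.1 = 1 := by rw [hch]; simp [h0, h1]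
        simp [List.foldl_cons, pvStep_eq, hk, ih, pvF, List.filter_cons]
      | false =>
        cases h2 : (("AIRSTA" : String) == kv.1) with
        | true =>
          have hk : pvRk kv.1 = 2 := by rw [hch]; simp [h0, h1, h2]
          simp [List.foldl_cons, pvStep_eq, hk, ih, pvF, List.filter_cons]
        | false =>
          cases h3 : (("CATARA" : String) == kv.1) with
          | true =>
            have hk : pvRk kv.1 = 3 := by rw [hch]; simp [h0, h1, h2, h3]
            simp [List.foldl_cons, pvStep_eq, hk, ih, pvF, List.filter_cons]
          | false =>
            cases h4 : (("FLTOPA" : String) == kv.1) with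
            | true =>
              have hk : pvRk kv.1 = 4 := by rw [hch]; simp [h0, h1, h2, h3, h4]
              simp [List.foldl_cons, pvStep_eq, hk, ih, pvF, List.filter_cons]
            | false =>
              cases h5 : (("FLBOT" : String) == kv.1) with
              | true =>
                have hk : pvRk kv.1 = 5 := by rw [hch]; simp [h0, h1, h2, h3, h4, h5]
                simp [List.foldl_cons, pvStep_eq, hk, ih, pvF, List.filter_cons]
              | false =>
                have hk : pvRk kv.1 = 6 := by rw [hch]; simp [h0, h1, h2, h3, h4, h5]
                simp [List.foldl_cons, pvStep_eq, hk, ih, pvF, List.filter_cons]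

-- on a list with distinct keys, filtering by one key yields A's guarded singleton
lemma pvFilterKey (k : String) (ps : List (String × String)) :
    (ps.map (fun p => p.1)).Nodup →
      (ps.filter (fun kv => kv.1 == k)).map (fun kv => pvFmt kv.1 kv.2)
        = if ps.any (fun p => p.1 == k) then
            [pvFmt k ((Option.map (fun x => x.2) (ps.find? (fun p => p.1 == k))).getD "")]
          else [] := by
  induction ps with
  | nil => intro _; simp
  | cons p t ih =>
    intro hnd
    simp only [List.map_cons, List.nodup_cons] at hnd
    obtain ⟨hp, hnt⟩ := hnd
    cases h : (p.1 == k) with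
    | false =>
      rw [show (p :: t).filter (fun kv => kv.1 == k) = t.filter (fun kv => kv.1 == k) from by
            simp [List.filter_cons, h],
          show ((p :: t).any fun q => q.1 == k) = (t.any fun q => q.1 == k) from by
            simp [List.any_cons, h],
          show List.find? (fun q => q.1 == k) (p :: t) = List.find? (fun q => q.1 == k) t from by
            simp [List.find?_cons, h]]
      exact ih hnt
    | true =>
      have hk : p.1 = k := by simpa using h
      have ht : t.filter (fun kv => kv.1 == k) = [] := by
        rw [List.filter_eq_nil_iff]
        intro kv hkv hbe
        exact hp (hk ▸ (by simpa using hbe : kv.1 = k) ▸ List.mem_map_of_mem hkv)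
      simp [List.filter_cons, List.any_cons, List.find?_cons, h, ht, hk]

lemma pvF_key (ps : List (String × String)) (hnd : (ps.map (fun p => p.1)).Nodup)
    (i : Nat) (k : String) (hik : ∀ x : String, (pvRk x == i) = (x == k)) :
    pvF i ps = if ps.any (fun p => p.1 == k) then
        [pvFmt k ((Option.map (fun x => x.2) (ps.find? (fun p => p.1 == k))).getD "")]
      else [] := by
  unfold pvF
  rw [List.filter_congr (fun kv _ => hik kv.1)]
  exact pvFilterKey k ps hnd

lemma pvHik0 : ∀ x : String, (pvRk x == 0) = (x == "OBJNAM") := by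
  intro x; rw [pvRk_chain]
  split_ifs <;> (try simp_all [beq_eq_false_iff_ne, ne_comm]) <;> (intro hh; subst hh; simp_all)
lemma pvHik1 : ∀ x : String, (pvRk x == 1) = (x == "AIRACN") := by
  intro x; rw [pvRk_chain]
  split_ifs <;> (try simp_all [beq_eq_false_iff_ne, ne_comm]) <;> (intro hh; subst hh; simp_all)
lemma pvHik2 : ∀ x : String, (pvRk x == 2) = (x == "AIRSTA") := by
  intro x; rw [pvRk_chain]
  split_ifs <;> (try simp_all [beq_eq_false_iff_ne, ne_comm]) <;> (intro hh; subst hh; simp_all)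
lemma pvHik3 : ∀ x : String, (pvRk x == 3) = (x == "CATARA") := by
  intro x; rw [pvRk_chain]
  split_ifs <;> (try simp_all [beq_eq_false_iff_ne, ne_comm]) <;> (intro hh; subst hh; simp_all)
lemma pvHik4 : ∀ x : String, (pvRk x == 4) = (x == "FLTOPA") := by
  intro x; rw [pvRk_chain]
  split_ifs <;> (try simp_all [beq_eq_false_iff_ne, ne_comm]) <;> (intro hh; subst hh; simp_all)
lemma pvHik5 : ∀ x : String, (pvRk x == 5) = (x == "FLBOT") := by
  intro x; rw [pvRk_chain]
  split_ifs <;> (try simp_all [beq_eq_false_iff_ne, ne_comm]) <;> (intro hh; subst hh; simp_all)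

lemma pvRk6 (x : String) : (pvRk x == 6) = !(pvIK.contains x) := by
  by_cases e0 : "OBJNAM" = x
  · subst e0; decide
  · by_cases e1 : "AIRACN" = x
    · subst e1; decide
    · by_cases e2 : "AIRSTA" = x
      · subst e2; decide
      · by_cases e3 : "CATARA" = x
        · subst e3; decide
        · by_cases e4 : "FLTOPA" = x
          · subst e4; decide
          · by_cases e5 : "FLBOT" = x
            · subst e5; decide
            · have f0 : (("OBJNAM" : String) == x) = false := beq_eq_false_iff_ne.mpr e0
              have f1 : (("AIRACN" : String) == x) = false := beq_eq_false_iff_ne.mpr e1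
              have f2 : (("AIRSTA" : String) == x) = false := beq_eq_false_iff_ne.mpr e2
              have f3 : (("CATARA" : String) == x) = false := beq_eq_false_iff_ne.mpr e3
              have f4 : (("FLTOPA" : String) == x) = false := beq_eq_false_iff_ne.mpr e4
              have f5 : (("FLBOT" : String) == x) = false := beq_eq_false_iff_ne.mpr e5
              have g0 : ¬ x = "OBJNAM" := fun hh => e0 hh.symm
              have g1 : ¬ x = "AIRACN" := fun hh => e1 hh.symm
              have g2 : ¬ x = "AIRSTA" := fun hh => e2 hh.symm
              have g3 : ¬ x = "CATARA" := fun hh => e3 hh.symm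
              have g4 : ¬ x = "FLTOPA" := fun hh => e4 hh.symm
              have g5 : ¬ x = "FLBOT" := fun hh => e5 hh.symm
              rw [pvRk_chain]
              simp [pvIK, f0, f1, f2, f3, f4, f5, g0, g1, g2, g3, g4, g5]

lemma pvF6 (ps : List (String × String)) :
    pvF 6 ps = (ps.filter (fun kv => !(pvIK.contains kv.1))).map (fun kv => pvFmt kv.1 kv.2) := by
  unfold pvF
  rw [List.filter_congr (fun kv _ => pvRk6 kv.1)]

lemma pvMapFilter {α β : Type} (c : α → Bool) (f : α → β) (l : List α) :
    (l.filter c).map f = l.flatMap (fun x => if c x then [f x] else []) := by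
  induction l with
  | nil => simp
  | cons a t ih => by_cases h : c a <;> simp [List.filter_cons, h, ih]

lemma pvMain (props : List (String × String)) : properties_str props = properties_str_alt props := by
  have hnd : (((PySem.Dict.ofList props).items.map (fun p => p.1))).Nodup := by
    simpa [PySem.Dict.keys] using
      PySem.Dict.nodup_keys_ofList (κ := String) (ν := String) props
  rw [pvAEq, pvAltEq, pvBuckets]
  refine congrArg _ ?_
  rw [PySem.List.foldl_append_if (fun key => (PySem.Dict.ofList props).contains key)
        (fun key => pvFmt key ((PySem.Dict.ofList props).getD key "")),
      PySem.List.foldl_append_if (fun kv : String × String => !(pvIK.contains kv.1))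
        (fun kv : String × String => pvFmt kv.1 kv.2)]
  rw [pvMapFilter]
  rw [pvF_key _ hnd 0 "OBJNAM" pvHik0, pvF_key _ hnd 1 "AIRACN" pvHik1,
      pvF_key _ hnd 2 "AIRSTA" pvHik2, pvF_key _ hnd 3 "CATARA" pvHik3,
      pvF_key _ hnd 4 "FLTOPA" pvHik4, pvF_key _ hnd 5 "FLBOT" pvHik5, pvF6]
  simp [pvIK, PySem.Dict.contains, PySem.Dict.getD, PySem.Dict.get?, List.append_assoc]
  rfl

-- ===== VERDICT (by name: the statement is the Claim_ definition above) =====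
theorem properties_str_spec : Claim_equal_properties_str := by
  intro props _
  unfold Spec_properties_str
  exact pvMain props
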